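-- pv_equiv track=rewrite | github.com/YangRuiguang-USN/extract-ba-with-context | extract_ba_with_context_v7.py | _collect_subtree
-- ===== SOURCE A (Python) =====
-- def _collect_subtree(token_idx, deps, tokens, visited=None):
--     """
--     Collecte récursivement tous les tokens dont la tête (directe ou
--     indirecte) est token_idx. Retourne une liste triée d'indices.
--     Protection contre les cycles (ne devrait pas arriver en dep bien formé).
--     """
--     if visited is None:
--         visited = set()
--     if token_idx in visited:
--         return []
--     visited.add(token_idx)
--
--     result = [token_idx]
--     for i, (head, _) in enumerate(deps):
--         if head == token_idx and i not in visited: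
--             result.extend(_collect_subtree(i, deps, tokens, visited))
--     return sorted(result)
-- ===== SOURCE B (Python) =====
-- def _collect_subtree(token_idx, deps, tokens, visited=None):
--     if visited is None:
--         visited = set()
--     if token_idx in visited:
--         return []
--     children = {}
--     for i, (head, _) in enumerate(deps):
--         children.setdefault(head, []).append(i)
--     visited.add(token_idx)
--     seen = [token_idx]
--     stack = [token_idx]
--     while stack:
--         node = stack.pop()
--         for c in children.get(node, ()):
--             if c not in visited:
--                 visited.add(c)
--                 seen.append(c)
--                 stack.append(c)
--     return sorted(seen)
-- ===== Notes on version B (the rewrite author's own statement) =====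
-- stated objective: alternative
-- what changed: A re-scans the whole deps list once per visited node inside a recursive DFS and re-sorts at every recursion level; B builds a head->children adjacency dict in one pass, runs a single iterative stack-based DFS over it, and sorts once at the end.
import Mathlib
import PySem

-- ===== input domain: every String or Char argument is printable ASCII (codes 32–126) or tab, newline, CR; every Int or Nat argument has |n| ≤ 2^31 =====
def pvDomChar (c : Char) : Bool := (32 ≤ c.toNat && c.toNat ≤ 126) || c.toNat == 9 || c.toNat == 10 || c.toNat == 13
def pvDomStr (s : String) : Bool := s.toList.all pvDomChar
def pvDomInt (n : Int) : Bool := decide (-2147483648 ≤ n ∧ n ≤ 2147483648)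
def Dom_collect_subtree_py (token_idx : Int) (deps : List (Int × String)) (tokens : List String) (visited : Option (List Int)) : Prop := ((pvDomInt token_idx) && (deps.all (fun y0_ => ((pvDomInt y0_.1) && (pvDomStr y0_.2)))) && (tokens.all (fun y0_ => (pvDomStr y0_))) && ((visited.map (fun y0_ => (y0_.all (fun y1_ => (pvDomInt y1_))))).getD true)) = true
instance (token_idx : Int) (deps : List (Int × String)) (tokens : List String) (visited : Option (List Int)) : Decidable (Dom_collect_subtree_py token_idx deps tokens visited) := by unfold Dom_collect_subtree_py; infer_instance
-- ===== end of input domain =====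

-- B replaces A's per-node rescans of deps (recursive DFS, sorting at every level) by a one-pass
-- head→children adjacency dict plus a single iterative stack DFS with one final sort (alternative
-- algorithm; the equivalence is about the return value — like A, B also adds the collected
-- indices to a caller-supplied `visited` set, the same mutation).

-- ===== PORT A =====
-- the `for i, (head, _) in enumerate(deps)` loop of A; `recur` is the recursive call at the next fuel
def collectLoopA (recur : Int → PySem.Set Int → List Int × PySem.Set Int) (t : Int) :
    List (Int × (Int × String)) → List Int × PySem.Set Int → List Int × PySem.Set Int
  | [], acc => acc
  | p :: rest, acc =>
    if p.2.1 = t ∧ ¬ PySem.Set.contains acc.2 p.1 then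
      let r := recur p.1 acc.2
      collectLoopA recur t rest (acc.1 ++ r.1, r.2)
    else collectLoopA recur t rest acc

-- A's recursion; the fuel only makes the recursion structural, deps.length + 1 is always enough
def collectA : Nat → Int → List (Int × String) → PySem.Set Int → List Int × PySem.Set Int
  | 0, _, _, vis => ([], vis)
  | Nat.succ f, t, deps, vis =>
    if PySem.Set.contains vis t then ([], vis)
    else
      let r := collectLoopA (fun i v => collectA f i deps v) t (PySem.List.enumerate deps)
        ([t], PySem.Set.add vis t)
      (PySem.List.sorted r.1 (fun x => x) false, r.2)

def collect_subtree_py (token_idx : Int) (deps : List (Int × String)) (tokens : List String) (visited : Option (List Int)) : List Int :=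
  (collectA (deps.length + 1) token_idx deps (PySem.Set.ofList (visited.getD []))).1

-- ===== PORT B =====
-- children.setdefault(head, []).append(i) over enumerate(deps)
def buildChildren (deps : List (Int × String)) : PySem.Dict Int (List Int) :=
  (PySem.List.enumerate deps).foldl
    (fun d p => PySem.Dict.modify d p.2.1 ([] : List Int) (fun l => l ++ [p.1]))
    PySem.Dict.empty

-- the `while stack:` loop; fuel = deps.length + 1 bounds the number of pops (each pushed index is
-- fresh), so the 0-fuel branch is never reached
def bfsLoopB : Nat → PySem.Dict Int (List Int) → List Int → PySem.Set Int → List Int → List Int × PySem.Set Int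
  | _, _, [], vis, seen => (seen, vis)
  | 0, _, _, vis, seen => (seen, vis)
  | Nat.succ f, children, stack, vis, seen =>
    let node := stack.getLast!
    let stack1 := stack.dropLast
    let s := (PySem.Dict.getD children node []).foldl
      (fun (st : PySem.Set Int × List Int × List Int) c =>
        if ¬ PySem.Set.contains st.1 c then (PySem.Set.add st.1 c, st.2.1 ++ [c], st.2.2 ++ [c])
        else st) (vis, seen, stack1)
    bfsLoopB f children s.2.2 s.1 s.2.1

def collect_subtree_py_alt (token_idx : Int) (deps : List (Int × String)) (tokens : List String) (visited : Option (List Int)) : List Int :=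
  let vis := PySem.Set.ofList (visited.getD [])
  if PySem.Set.contains vis token_idx then []
  else
    let children := buildChildren deps
    let r := bfsLoopB (deps.length + 1) children [token_idx] (PySem.Set.add vis token_idx) [token_idx]
    PySem.List.sorted r.1 (fun x => x) false

-- ===== PRECONDITION & SPEC =====
def Spec_collect_subtree_py (token_idx : Int) (deps : List (Int × String)) (tokens : List String) (visited : Option (List Int)) (out : List Int) : Prop := out = collect_subtree_py_alt token_idx deps tokens visited
instance (token_idx : Int) (deps : List (Int × String)) (tokens : List String) (visited : Option (List Int)) (out : List Int) : Decidable (Spec_collect_subtree_py token_idx deps tokens visited out) := by unfold Spec_collect_subtree_py; infer_instance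

-- ===== CLAIM (what is proved, stated in full; the proofs are below) =====
def Claim_equal_collect_subtree_py : Prop := ∀ (token_idx : Int) (deps : List (Int × String)) (tokens : List String) (visited : Option (List Int)), Dom_collect_subtree_py token_idx deps tokens visited → Spec_collect_subtree_py token_idx deps tokens visited (collect_subtree_py token_idx deps tokens visited)

-- ===== LEMMAS AND PROOFS =====

-- `Child deps x i` : deps[i] exists and its head is x
def Child (deps : List (Int × String)) (x : Int) (i : Nat) : Prop := ∃ s, deps[i]? = some (x, s)

-- reachability from t along Child edges whose targets avoid `vis`
inductive Reach (deps : List (Int × String)) (vis : List Int) : Int → Int → Prop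
  | base (t : Int) : Reach deps vis t t
  | step {t x : Int} (i : Nat) : Reach deps vis t x → Child deps x i →
      (Int.ofNat i : Int) ∉ vis → Reach deps vis t (Int.ofNat i)

theorem reach_mono {deps : List (Int × String)} {v w : List Int} (hsub : ∀ a, a ∈ v → a ∈ w)
    {t x : Int} (h : Reach deps w t x) : Reach deps v t x := by
  induction h with
  | base => exact .base _
  | step i _ hc hni ih => exact .step i ih hc (fun hm => hni (hsub _ hm))

theorem reach_trans {deps : List (Int × String)} {v : List Int} {a b c : Int}
    (h1 : Reach deps v a b) (h2 : Reach deps v b c) : Reach deps v a c := by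
  induction h2 with
  | base => exact h1
  | step i _ hc hni ih => exact .step i ih hc hni

-- fold reachability from a fresh child of t into reachability from t
theorem reach_shift {deps : List (Int × String)} {vis : List Int} {t : Int} {i : Nat}
    (hc : Child deps t i) (hni : (Int.ofNat i : Int) ∉ vis) {x : Int}
    (h : Reach deps (vis ++ [t]) (Int.ofNat i) x) : Reach deps vis t x := by
  induction h with
  | base => exact .step i (.base t) hc hni
  | step j _ hcj hnj ih =>
      exact .step j ih hcj (fun hm => hnj (List.mem_append_left _ hm))

-- number of in-range indices not yet visited
def U (deps : List (Int × String)) (vis : List Int) : Nat :=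
  ((Finset.range deps.length).filter (fun i => (Int.ofNat i : Int) ∉ vis)).card

theorem U_le (deps : List (Int × String)) (vis : List Int) : U deps vis ≤ deps.length := by
  classical
  calc ((Finset.range deps.length).filter _).card ≤ (Finset.range deps.length).card :=
        Finset.card_filter_le _ _
    _ = deps.length := Finset.card_range _

theorem U_mono_append (deps : List (Int × String)) (vis w : List Int) :
    U deps (vis ++ w) ≤ U deps vis := by
  classical
  apply Finset.card_le_card
  intro i hi
  simp only [Finset.mem_filter, Finset.mem_range] at hi ⊢
  exact ⟨hi.1, fun hm => hi.2 (List.mem_append_left _ hm)⟩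

theorem U_append_lt (deps : List (Int × String)) (vis : List Int) {i : Nat}
    (hin : i < deps.length) (hni : (Int.ofNat i : Int) ∉ vis) :
    U deps (vis ++ [Int.ofNat i]) < U deps vis := by
  classical
  apply Finset.card_lt_card
  constructor
  · intro j hj
    simp only [Finset.mem_filter, Finset.mem_range] at hj ⊢
    exact ⟨hj.1, fun hm => hj.2 (List.mem_append_left _ hm)⟩
  · intro hsub
    have hmem : i ∈ (Finset.range deps.length).filter (fun j => (Int.ofNat j : Int) ∉ vis) := by
      simp only [Finset.mem_filter, Finset.mem_range]; exact ⟨hin, hni⟩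
    have := hsub hmem
    simp only [Finset.mem_filter, Finset.mem_range] at this
    exact this.2 (by simp)

theorem U_append_many (deps : List (Int × String)) :
    ∀ (δ vis : List Int), δ.Nodup →
    (∀ c ∈ δ, c ∉ vis ∧ ∃ i : Nat, i < deps.length ∧ c = Int.ofNat i) →
    U deps (vis ++ δ) + δ.length ≤ U deps vis := by
  intro δ
  induction δ with
  | nil => intro vis _ _; simp
  | cons c δ' ih =>
      intro vis hnd hall
      obtain ⟨hcn, i, hin, rfl⟩ := hall c (by simp)
      have h1 : U deps ((vis ++ [Int.ofNat i]) ++ δ') + δ'.length ≤ U deps (vis ++ [Int.ofNat i]) := by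
        apply ih _ hnd.of_cons
        intro c' hc'
        obtain ⟨h1, h2⟩ := hall c' (by simp [hc'])
        refine ⟨?_, h2⟩
        simp only [List.mem_append, List.mem_singleton]
        rintro (hm | rfl)
        · exact h1 hm
        · exact (List.nodup_cons.mp hnd).1 hc'
      have h2 : U deps (vis ++ [Int.ofNat i]) < U deps vis := U_append_lt deps vis hin hcn
      have h3 : vis ++ Int.ofNat i :: δ' = (vis ++ [Int.ofNat i]) ++ δ' := by simp
      rw [h3]
      simp only [List.length_cons]
      omega

-- the specification carried through A's recursion
def SpecA (deps : List (Int × String)) (f : Nat) (t : Int) (vis : List Int) : Prop :=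
  ∃ D : List Int,
    collectA f t deps vis = (PySem.List.sorted D (fun x => x) false, vis ++ D) ∧
    (vis ++ D).Nodup ∧
    t ∈ D ∧
    (∀ x ∈ D, Reach deps vis t x) ∧
    (∀ x ∈ D, ∀ i : Nat, Child deps x i → (Int.ofNat i : Int) ∈ vis ++ D)

theorem specLoopA (deps : List (Int × String)) (f : Nat) (t : Int)
    (HA : ∀ t' vis', U deps (PySem.Set.add vis' t') < f → t' ∉ vis' → vis'.Nodup → SpecA deps f t' vis') :
    ∀ (L : List (Int × (Int × String))) (r0 v : List Int), v.Nodup → U deps v ≤ f →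
    (∀ p ∈ L, ∃ k : Nat, p.1 = Int.ofNat k ∧ deps[k]? = some p.2) →
    ∃ D R : List Int,
      collectLoopA (fun i w => collectA f i deps w) t L (r0, v) = (r0 ++ R, v ++ D) ∧
      R.Perm D ∧ (v ++ D).Nodup ∧
      (∀ x ∈ D, ∃ i : Nat, Child deps t i ∧ (Int.ofNat i : Int) ∉ v ∧ Reach deps v (Int.ofNat i) x) ∧
      (∀ x ∈ D, ∀ i : Nat, Child deps x i → (Int.ofNat i : Int) ∈ v ++ D) ∧
      (∀ p ∈ L, p.2.1 = t → p.1 ∈ v ++ D) := by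
  intro L
  induction L with
  | nil =>
      intro r0 v hnd hU _
      exact ⟨[], [], by simp [collectLoopA], .nil, by simpa using hnd, by simp, by simp, by simp⟩
  | cons p L' ih =>
      intro r0 v hnd hU hL
      obtain ⟨k, hpk, hdk⟩ := hL p (by simp)
      have hkrange : k < deps.length := (List.getElem?_eq_some_iff.mp hdk).1
      by_cases hcond : p.2.1 = t ∧ ¬ PySem.Set.contains v p.1
      · -- child found and unvisited: recurse
        have hni : p.1 ∉ v := fun hm => hcond.2 ((PySem.Set.contains_iff _ _).mpr hm)
        have hUadd : U deps (PySem.Set.add v p.1) < f := by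
          rw [PySem.Set.add_of_not_mem hni, hpk]
          exact lt_of_lt_of_le (U_append_lt deps v hkrange (hpk ▸ hni)) hU
        obtain ⟨D1, heq1, hnd1, hmem1, hreach1, hclo1⟩ := HA p.1 v hUadd hni hnd
        obtain ⟨D2, R2, heq2, hperm2, hnd2, hsound2, hclo2, hscan2⟩ :=
          ih (r0 ++ PySem.List.sorted D1 (fun x => x) false) (v ++ D1) hnd1
            (le_trans (U_mono_append deps v D1) hU) (fun q hq => hL q (by simp [hq]))
        have hchild : Child deps t k := ⟨p.2.2, by simp [hdk, Prod.ext_iff, hcond.1]⟩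
        refine ⟨D1 ++ D2, PySem.List.sorted D1 (fun x => x) false ++ R2, ?_, ?_, ?_, ?_, ?_, ?_⟩
        · simp only [collectLoopA, if_pos hcond]
          rw [heq1]
          simpa [List.append_assoc] using heq2
        · exact ((PySem.List.sorted_perm D1 (fun x => x) false).append hperm2)
        · simpa [List.append_assoc] using hnd2
        · intro x hx
          rcases List.mem_append.mp hx with hx1 | hx2
          · exact ⟨k, hchild, hpk ▸ hni, hpk ▸ hreach1 x hx1⟩
          · obtain ⟨i, hci, hiv, hr⟩ := hsound2 x hx2
            exact ⟨i, hci, fun hm => hiv (List.mem_append_left _ hm),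
              reach_mono (fun a ha => List.mem_append_left _ ha) hr⟩
        · intro x hx i hci
          rcases List.mem_append.mp hx with hx1 | hx2
          · have := hclo1 x hx1 i hci
            simpa [List.append_assoc] using List.mem_append_left D2 this
          · simpa [List.append_assoc] using hclo2 x hx2 i hci
        · intro q hq hqt
          rcases List.mem_cons.mp hq with rfl | hq'
          · have : q.1 ∈ D1 := hpk ▸ hmem1
            simp [List.mem_append, this]
          · simpa [List.append_assoc] using hscan2 q hq' hqt
      · -- skipped entry
        obtain ⟨D, R, heq, hperm, hndD, hsound, hclo, hscan⟩ := ih r0 v hnd hU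
          (fun q hq => hL q (by simp [hq]))
        refine ⟨D, R, ?_, hperm, hndD, hsound, hclo, ?_⟩
        · simpa only [collectLoopA, if_neg hcond] using heq
        · intro q hq hqt
          rcases List.mem_cons.mp hq with rfl | hq'
          · have hcont : PySem.Set.contains v q.1 := by
              by_contra hc
              exact hcond ⟨hqt, hc⟩
            exact List.mem_append_left _ ((PySem.Set.contains_iff _ _).mp hcont)
          · exact hscan q hq' hqt

theorem specA_holds (deps : List (Int × String)) :
    ∀ (f : Nat) (t : Int) (vis : List Int), U deps (PySem.Set.add vis t) < f → t ∉ vis → vis.Nodup →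
    SpecA deps f t vis := by
  intro f
  induction f with
  | zero => intro t vis h _ _; omega
  | succ f ihf =>
      intro t vis hU ht hnd
      have hvis1 : PySem.Set.add vis t = vis ++ [t] := PySem.Set.add_of_not_mem ht
      have hnd1 : (vis ++ [t]).Nodup := by
        simp only [List.nodup_append, List.nodup_singleton]
        refine ⟨hnd, trivial, ?_⟩
        intro a ha b hb
        simp only [List.mem_singleton] at hb
        subst hb
        exact fun h => ht (h ▸ ha)
      have hU1 : U deps (vis ++ [t]) ≤ f := by rw [← hvis1]; omega
      have henum : ∀ p ∈ PySem.List.enumerate deps, ∃ k : Nat, p.1 = Int.ofNat k ∧ deps[k]? = some p.2 := by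
        intro p hp
        rcases (PySem.List.mem_enumerate_iff _ _ _).mp hp with ⟨k, hk, rfl⟩
        exact ⟨k, by simp, by simp [hk]⟩
      obtain ⟨D2, R2, heq2, hperm2, hnd2, hsound2, hclo2, hscan2⟩ :=
        specLoopA deps f t ihf (PySem.List.enumerate deps) [t] (vis ++ [t]) hnd1 hU1 henum
      have hncont : ¬ (PySem.Set.contains vis t = true) := fun h => ht ((PySem.Set.contains_iff _ _).mp h)
      refine ⟨t :: D2, ?_, ?_, by simp, ?_, ?_⟩
      · simp only [collectA, if_neg hncont, hvis1, heq2]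
        refine Prod.ext ?_ (by simp)
        show PySem.List.sorted ([t] ++ R2) (fun x => x) false = PySem.List.sorted (t :: D2) (fun x => x) false
        exact PySem.List.sorted_eq_sorted_of_perm _ _ _ (fun a b h => h) (List.Perm.cons t hperm2)
      · have : vis ++ t :: D2 = (vis ++ [t]) ++ D2 := by simp
        rw [this]; exact hnd2
      · intro x hx
        rcases List.mem_cons.mp hx with rfl | hx2
        · exact .base x
        · obtain ⟨i, hci, hniv, hr⟩ := hsound2 x hx2
          exact reach_shift hci (fun hm => hniv (List.mem_append_left _ hm)) hr
      · intro x hx i hci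
        have hgoal : vis ++ t :: D2 = (vis ++ [t]) ++ D2 := by simp
        rw [hgoal]
        rcases List.mem_cons.mp hx with rfl | hx2
        · obtain ⟨str, hstr⟩ := hci
          obtain ⟨hlt, hget⟩ := List.getElem?_eq_some_iff.mp hstr
          have hpmem : ((Int.ofNat i : Int), (x, str)) ∈ PySem.List.enumerate deps := by
            refine (PySem.List.mem_enumerate_iff _ _ _).mpr ⟨i, hlt, ?_⟩
            simp [hget]
          exact hscan2 _ hpmem rfl
        · exact hclo2 x hx2 i hci

-- A's result set is exactly the Reach set
theorem specA_mem (deps : List (Int × String)) {f : Nat} {t : Int} {vis : List Int}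
    (h : SpecA deps f t vis) (hvis : vis.Nodup) :
    ∃ D : List Int, collectA f t deps vis = (PySem.List.sorted D (fun x => x) false, vis ++ D) ∧
      D.Nodup ∧ (∀ x, x ∈ D ↔ Reach deps vis t x) := by
  obtain ⟨D, heq, hndD, hmemt, hreach, hclo⟩ := h
  refine ⟨D, heq, hndD.of_append_right, fun x => ⟨hreach x, ?_⟩⟩
  intro hr
  induction hr with
  | base => exact hmemt
  | step i hr' hci hni ih =>
      rcases List.mem_append.mp (hclo _ ih i hci) with hm | hm
      · exact absurd hm hni
      · exact hm

-- ---- B side ----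

theorem buildChildren_getD_aux (deps : List (Int × String)) :
    ∀ (L : List (Int × (Int × String))) (d : PySem.Dict Int (List Int)) (x : Int),
      PySem.Dict.getD (L.foldl (fun d p => PySem.Dict.modify d p.2.1 ([] : List Int) (fun l => l ++ [p.1])) d) x []
      = PySem.Dict.getD d x [] ++ (L.filter (fun p => decide (p.2.1 = x))).map (·.1) := by
  intro L
  induction L with
  | nil => intro d x; simp
  | cons p L' ih =>
      intro d x
      simp only [List.foldl_cons]
      rw [ih, PySem.Dict.getD_modify]
      by_cases hx : p.2.1 = x
      · simp [List.filter_cons, hx]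
      · rw [if_neg (fun h => hx h.symm)]
        simp [List.filter_cons, hx]

-- membership in the adjacency list = Child edge
theorem mem_children (deps : List (Int × String)) (x c : Int) :
    c ∈ PySem.Dict.getD (buildChildren deps) x [] ↔ ∃ k : Nat, c = Int.ofNat k ∧ Child deps x k := by
  constructor
  · intro hc
    unfold buildChildren at hc
    rw [buildChildren_getD_aux deps] at hc
    simp only [PySem.Dict.getD_empty, List.nil_append, List.mem_map, List.mem_filter] at hc
    obtain ⟨p, ⟨hp, hpx⟩, rfl⟩ := hc
    obtain ⟨k, hk, rfl⟩ := (PySem.List.mem_enumerate_iff _ _ _).mp hp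
    simp only [decide_eq_true_eq] at hpx
    refine ⟨k, by simp, deps[k].2, ?_⟩
    rw [List.getElem?_eq_getElem hk]
    simp only [Option.some.injEq, Prod.ext_iff]
    exact ⟨hpx, trivial⟩
  · rintro ⟨k, rfl, ss, hs⟩
    obtain ⟨hk, hget⟩ := List.getElem?_eq_some_iff.mp hs
    unfold buildChildren
    rw [buildChildren_getD_aux deps]
    simp only [PySem.Dict.getD_empty, List.nil_append, List.mem_map, List.mem_filter]
    exact ⟨(Int.ofNat k, deps[k]),
      ⟨(PySem.List.mem_enumerate_iff _ _ _).mpr ⟨k, hk, by simp⟩, by simp [hget]⟩, rfl⟩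

theorem foldStepB (cs : List Int) :
    ∀ (v sn st : List Int), v.Nodup →
    ∃ δ : List Int,
      cs.foldl (fun (stt : PySem.Set Int × List Int × List Int) c =>
        if ¬ PySem.Set.contains stt.1 c then (PySem.Set.add stt.1 c, stt.2.1 ++ [c], stt.2.2 ++ [c])
        else stt) (v, sn, st) = (v ++ δ, sn ++ δ, st ++ δ) ∧
      (v ++ δ).Nodup ∧
      (∀ c ∈ δ, c ∈ cs ∧ c ∉ v) ∧
      (∀ c ∈ cs, c ∈ v ++ δ) := by
  induction cs with
  | nil => intro v sn st hnd; exact ⟨[], by simp, by simpa using hnd, by simp, by simp⟩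
  | cons c cs' ih =>
      intro v sn st hnd
      by_cases hc : c ∈ v
      · have hcont : ¬ ¬ (PySem.Set.contains v c = true) := fun h => h ((PySem.Set.contains_iff _ _).mpr hc)
        obtain ⟨δ, heq, hndδ, hmem, hall⟩ := ih v sn st hnd
        refine ⟨δ, ?_, hndδ, ?_, ?_⟩
        · simpa only [List.foldl_cons, if_neg hcont] using heq
        · exact fun c' hc' => ⟨List.mem_cons_of_mem _ (hmem c' hc').1, (hmem c' hc').2⟩
        · intro c' hc'
          rcases List.mem_cons.mp hc' with rfl | h
          · exact List.mem_append_left _ hc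
          · exact hall c' h
      · have hnd1 : (v ++ [c]).Nodup := by
          simp only [List.nodup_append, List.nodup_singleton]
          refine ⟨hnd, trivial, ?_⟩
          intro a ha b hb
          simp only [List.mem_singleton] at hb
          subst hb
          exact fun h => hc (h ▸ ha)
        obtain ⟨δ, heq, hndδ, hmem, hall⟩ := ih (v ++ [c]) (sn ++ [c]) (st ++ [c]) hnd1
        have hcont : ¬ (PySem.Set.contains v c = true) := fun h => hc ((PySem.Set.contains_iff _ _).mp h)
        refine ⟨c :: δ, ?_, ?_, ?_, ?_⟩
        · simp only [List.foldl_cons, if_pos (fun h => hcont h), PySem.Set.add_of_not_mem hc]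
          simpa [List.append_assoc] using heq
        · simpa [List.append_assoc] using hndδ
        · intro c' hc'
          rcases List.mem_cons.mp hc' with rfl | h
          · exact ⟨by simp, hc⟩
          · obtain ⟨h1, h2⟩ := hmem c' h
            exact ⟨by simp [h1], fun hm => h2 (List.mem_append_left _ hm)⟩
        · intro c' hc'
          rcases List.mem_cons.mp hc' with rfl | h
          · simp
          · have := hall c' h
            simpa [List.append_assoc] using this

theorem specB (deps : List (Int × String)) :
    ∀ (f : Nat) (stack vis seen : List Int),
    stack.length + U deps vis ≤ f → vis.Nodup →
    (∀ x ∈ seen, x ∈ vis) → (∀ x ∈ stack, x ∈ seen) →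
    (∀ x ∈ seen, x ∉ stack → ∀ i : Nat, Child deps x i → (Int.ofNat i : Int) ∈ vis) →
    ∃ Δ : List Int,
      bfsLoopB f (buildChildren deps) stack vis seen = (seen ++ Δ, vis ++ Δ) ∧
      (vis ++ Δ).Nodup ∧
      (∀ x ∈ Δ, ∃ y ∈ stack, Reach deps vis y x) ∧
      (∀ x ∈ seen ++ Δ, ∀ i : Nat, Child deps x i → (Int.ofNat i : Int) ∈ vis ++ Δ) := by
  intro f
  induction f with
  | zero =>
      intro stack vis seen hfuel hnd hseen hstack hclosed
      cases stack with
      | nil =>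
          refine ⟨[], by simp [bfsLoopB], by simpa using hnd, by simp, ?_⟩
          intro x hx i hci
          simp only [List.append_nil] at hx ⊢
          exact hclosed x hx (by simp) i hci
      | cons a as => simp at hfuel
  | succ f ihf =>
      intro stack vis seen hfuel hnd hseen hstack hclosed
      cases stack with
      | nil =>
          refine ⟨[], by simp [bfsLoopB], by simpa using hnd, by simp, ?_⟩
          intro x hx i hci
          simp only [List.append_nil] at hx ⊢
          exact hclosed x hx (by simp) i hci
      | cons a as =>
          rcases List.eq_nil_or_concat (a :: as) with habs | ⟨q, y, hqy⟩
          · simp at habs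
          have hqy' : a :: as = q ++ [y] := by simpa [List.concat_eq_append] using hqy
          -- one pop
          have hlast : (a :: as).getLast! = y := by
            rw [hqy', List.getLast!_eq_getLast?_getD, List.getLast?_concat]; rfl
          have hdrop : (a :: as).dropLast = q := by rw [hqy']; exact List.dropLast_concat ..
          obtain ⟨δ, hfold, hndδ, hmemδ, hallδ⟩ :=
            foldStepB (PySem.Dict.getD (buildChildren deps) y []) vis seen q hnd
          have hδprop : ∀ c ∈ δ, c ∉ vis ∧ ∃ i : Nat, i < deps.length ∧ c = Int.ofNat i := by
            intro c hc
            obtain ⟨h1, h2⟩ := hmemδ c hc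
            obtain ⟨k, rfl, hck⟩ := (mem_children deps y c).mp h1
            obtain ⟨ss, hss⟩ := hck
            exact ⟨h2, k, (List.getElem?_eq_some_iff.mp hss).1, rfl⟩
          have hδnodup : δ.Nodup := hndδ.of_append_right
          have hUδ : U deps (vis ++ δ) + δ.length ≤ U deps vis :=
            U_append_many deps δ vis hδnodup hδprop
          have hymem : y ∈ seen := hstack y (by rw [hqy']; simp)
          obtain ⟨Δ', heq', hnd', hsound', hclo'⟩ := ihf (q ++ δ) (vis ++ δ) (seen ++ δ)
            (by have h1 : (a :: as).length = q.length + 1 := by rw [hqy']; simp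
                simp only [List.length_append]
                simp only [h1] at hfuel
                omega)
            hndδ
            (by intro x hx
                rcases List.mem_append.mp hx with h | h
                · exact List.mem_append_left _ (hseen x h)
                · exact List.mem_append_right _ h)
            (by intro x hx
                rcases List.mem_append.mp hx with h | h
                · exact List.mem_append_left _ (hstack x (by rw [hqy']; exact List.mem_append_left _ h))
                · exact List.mem_append_right _ h)
            (by intro x hx hnx i hci
                rcases List.mem_append.mp hx with h | h
                · by_cases hxy : x = y
                  · subst hxy
                    have : (Int.ofNat i : Int) ∈ PySem.Dict.getD (buildChildren deps) x [] :=
                      (mem_children deps x _).mpr ⟨i, rfl, hci⟩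
                    exact hallδ _ this
                  · have hxns : x ∉ a :: as := by
                      rw [hqy']
                      intro hm
                      rcases List.mem_append.mp hm with hm1 | hm1
                      · exact hnx (List.mem_append_left _ hm1)
                      · exact hxy (by simpa using hm1)
                    exact List.mem_append_left _ (hclosed x h hxns i hci)
                · exact absurd (List.mem_append_right q h) hnx)
          have hreachδ : ∀ c ∈ δ, Reach deps vis y c := by
            intro c hc
            obtain ⟨h1, h2⟩ := hmemδ c hc
            obtain ⟨k, rfl, hck⟩ := (mem_children deps y _).mp h1
            exact .step k (.base y) hck h2
          refine ⟨δ ++ Δ', ?_, ?_, ?_, ?_⟩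
          · show bfsLoopB (f + 1) (buildChildren deps) (a :: as) vis seen = _
            simp only [bfsLoopB, hlast, hdrop, hfold]
            rw [heq']
            simp [List.append_assoc]
          · simpa [List.append_assoc] using hnd'
          · intro x hx
            rcases List.mem_append.mp hx with h | h
            · exact ⟨y, by rw [hqy']; simp, hreachδ x h⟩
            · obtain ⟨z, hz, hr⟩ := hsound' x h
              have hr' : Reach deps vis z x :=
                reach_mono (fun b hb => List.mem_append_left _ hb) hr
              rcases List.mem_append.mp hz with h1 | h1
              · exact ⟨z, by rw [hqy']; exact List.mem_append_left _ h1, hr'⟩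
              · exact ⟨y, by rw [hqy']; simp, reach_trans (hreachδ z h1) hr'⟩
          · intro x hx i hci
            have hx' : x ∈ (seen ++ δ) ++ Δ' := by simpa [List.append_assoc] using hx
            have := hclo' x hx' i hci
            simpa [List.append_assoc] using this

-- B's result set is exactly the Reach set
theorem specB_mem (deps : List (Int × String)) (t : Int) (vis : List Int)
    (hnd : vis.Nodup) (ht : t ∉ vis) :
    ∃ S : List Int,
      (bfsLoopB (deps.length + 1) (buildChildren deps) [t] (PySem.Set.add vis t) [t]).1 = S ∧
      S.Nodup ∧ (∀ x, x ∈ S ↔ Reach deps vis t x) := by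
  have hvis1 : PySem.Set.add vis t = vis ++ [t] := PySem.Set.add_of_not_mem ht
  have hnd1 : (vis ++ [t]).Nodup := by
    simp only [List.nodup_append, List.nodup_singleton]
    refine ⟨hnd, trivial, ?_⟩
    intro a ha b hb
    simp only [List.mem_singleton] at hb
    subst hb
    exact fun h => ht (h ▸ ha)
  obtain ⟨Δ, heq, hndΔ, hsound, hclo⟩ := specB deps (deps.length + 1) [t] (vis ++ [t]) [t]
    (by have := U_le deps (vis ++ [t]); simp only [List.length_singleton]; omega)
    hnd1 (by simp) (by simp)
    (by intro x hx hnx; simp at hx hnx; exact absurd hx hnx)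
  refine ⟨[t] ++ Δ, by rw [hvis1, heq], ?_, ?_⟩
  · have : (vis ++ ([t] ++ Δ)).Nodup := by simpa [List.append_assoc] using hndΔ
    exact this.of_append_right
  · intro x
    constructor
    · intro hx
      rcases List.mem_append.mp hx with h | h
      · simp only [List.mem_singleton] at h
        subst h
        exact .base x
      · obtain ⟨z, hz, hr⟩ := hsound x h
        simp only [List.mem_singleton] at hz
        subst hz
        exact reach_mono (fun b hb => List.mem_append_left _ hb) hr
    · intro hr
      induction hr with
      | base => simp
      | step i hr' hci hni ih =>
          have := hclo _ ih i hci
          rcases List.mem_append.mp this with h | h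
          · rcases List.mem_append.mp h with h1 | h1
            · exact absurd h1 hni
            · exact List.mem_append_left _ h1
          · exact List.mem_append_right _ h

-- ===== VERDICT (by name: the statement is the Claim_ definition above) =====
theorem collect_subtree_py_spec : Claim_equal_collect_subtree_py := by
  intro token_idx deps tokens visited _
  unfold Spec_collect_subtree_py collect_subtree_py collect_subtree_py_alt
  set vis0 : PySem.Set Int := PySem.Set.ofList (visited.getD []) with hvis0
  have hndv : vis0.Nodup := PySem.Set.nodup_ofList _
  by_cases hc : token_idx ∈ vis0
  · have hcont : PySem.Set.contains vis0 token_idx = true := (PySem.Set.contains_iff _ _).mpr hc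
    simp only [collectA, hcont, if_pos]
  · have hU : U deps (PySem.Set.add vis0 token_idx) < deps.length + 1 := by
      have := U_le deps (PySem.Set.add vis0 token_idx); omega
    obtain ⟨DA, heqA, hndA, hmemA⟩ :=
      specA_mem deps (specA_holds deps (deps.length + 1) token_idx vis0 hU hc hndv) hndv
    obtain ⟨S, heqS, hndS, hmemS⟩ := specB_mem deps token_idx vis0 hndv hc
    have hncont : ¬ (PySem.Set.contains vis0 token_idx = true) :=
      fun h => hc ((PySem.Set.contains_iff _ _).mp h)
    rw [heqA]
    simp only [if_neg hncont]
    rw [heqS]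
    have hperm : DA.Perm S := by
      rw [List.perm_ext_iff_of_nodup hndA hndS]
      intro x
      rw [hmemA x, hmemS x]
    exact PySem.List.sorted_eq_sorted_of_perm _ _ _ (fun a b h => h) hperm
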